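-- pv_equiv track=rewrite | github.com/grishkin/aoc2019 | day4/day4.py | passwordTest
-- ===== SOURCE A (Python) =====
-- def passwordTest(num):
--     hasDouble = False
--     isIncreasing = True
--     numStr = str(num)
--     for i, digit in enumerate(numStr):
--         if i + 1 < len(numStr):
--             if (int(digit) > int(numStr[i + 1])):
--                 isIncreasing = False
--             if digit == numStr[i + 1]:
--                 lowerGood = i - 1 < 0 or numStr[i - 1] != digit
--                 upperGood = i + 2 >= len(numStr) or numStr[i + 2] != digit
--                 if hasDouble:
--                     continue
--                 hasDouble = lowerGood and upperGood
--     return isIncreasing and hasDouble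
-- ===== SOURCE B (Python) =====
-- def passwordTest(num):
--     digits = [int(c) for c in str(num)]
--     runs = []  # run-length encoding of digits, most recent run first
--     for d in digits:
--         if runs and runs[0][0] == d:
--             runs[0][1] += 1
--         else:
--             runs.insert(0, [d, 1])
--     return digits == sorted(digits) and any(n == 2 for _, n in runs)
-- ===== Notes on version B (the rewrite author's own statement) =====
-- stated objective: alternative
-- what changed: Replaces A's per-index lookbehind/lookahead neighbor checks with a run-length encoding of the digit list (isolated double = a run of length exactly 2) and checks monotonicity by comparing the digit list with its sorted copy.
import Mathlib
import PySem

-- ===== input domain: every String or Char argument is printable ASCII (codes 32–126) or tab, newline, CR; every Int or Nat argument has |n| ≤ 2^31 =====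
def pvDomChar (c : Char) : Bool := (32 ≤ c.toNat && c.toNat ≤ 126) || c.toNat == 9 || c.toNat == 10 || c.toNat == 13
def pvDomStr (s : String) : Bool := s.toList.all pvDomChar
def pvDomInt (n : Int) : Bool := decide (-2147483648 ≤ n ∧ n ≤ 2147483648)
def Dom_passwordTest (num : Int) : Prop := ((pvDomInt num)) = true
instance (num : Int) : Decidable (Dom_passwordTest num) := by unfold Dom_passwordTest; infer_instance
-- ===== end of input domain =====

-- B replaces A's indexed lookbehind/lookahead scan by a run-length encoding of the digits
-- (isolated double = run of length exactly 2) plus a digits-vs-sorted(digits) monotonicity check.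

-- ===== PORT A =====
-- int(digit) on a one-character string is PySem.Int.ofChars? [digit]; under Pre_ (0 ≤ num) every
-- character of str(num) is a decimal digit, so ofChars? is always `some` and `.getD 0` is exact.
-- numStr[i+1] / numStr[i-1] / numStr[i+2] are only observed where Python indexes in range
-- (the `or` guards make the value independent of the out-of-range default).
def passwordTest (num : Int) : Bool :=
  let numStr := PySem.Int.toChars num
  let n : Int := numStr.length
  let res := (PySem.List.enumerate numStr 0).foldl (fun (st : Bool × Bool) (p : Int × Char) =>
    let hasDouble := st.1
    let isIncreasing := st.2
    let i := p.1
    let digit := p.2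
    if i + 1 < n then
      let isIncreasing := if (PySem.Int.ofChars? [digit]).getD 0 > (PySem.Int.ofChars? [PySem.List.pyGetD numStr (i+1) ' ']).getD 0 then false else isIncreasing
      if digit = PySem.List.pyGetD numStr (i+1) ' ' then
        if hasDouble then (hasDouble, isIncreasing)
        else
          let lowerGood := decide (i - 1 < 0) || decide (PySem.List.pyGetD numStr (i-1) ' ' ≠ digit)
          let upperGood := decide (i + 2 ≥ n) || decide (PySem.List.pyGetD numStr (i+2) ' ' ≠ digit)
          (lowerGood && upperGood, isIncreasing)
      else (hasDouble, isIncreasing)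
    else (hasDouble, isIncreasing)) (false, true)
  res.2 && res.1

-- ===== PORT B =====
-- B-side helper: the run-length-encoding step (most recent run first)
def pvStep (runs : List (Int × Int)) (d : Int) : List (Int × Int) :=
  match runs with
  | (d0, k) :: rest => if d0 = d then (d0, k+1) :: rest else (d, 1) :: (d0, k) :: rest
  | [] => [(d, 1)]

def passwordTest_alt (num : Int) : Bool :=
  let digits := (PySem.Int.toChars num).map (fun c => (PySem.Int.ofChars? [c]).getD 0)
  let runs := digits.foldl pvStep []
  decide (digits = PySem.List.sorted digits (fun x => x) false) && runs.any (fun r => r.2 == 2)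

-- ===== PRECONDITION & SPEC =====
-- Pre_ excludes exactly num < 0, where str(num) starts with '-' and A raises ValueError at int('-')
-- (B raises the same ValueError there).
def Pre_passwordTest (num : Int) : Prop := 0 ≤ num
instance (num : Int) : Decidable (Pre_passwordTest num) := by unfold Pre_passwordTest; infer_instance

def pvWitness_passwordTest : Int := (122345)

def Spec_passwordTest (num : Int) (out : Bool) : Prop := out = passwordTest_alt num
instance (num : Int) (out : Bool) : Decidable (Spec_passwordTest num out) := by unfold Spec_passwordTest; infer_instance

-- ===== CLAIM (what is proved, stated in full; the proofs are below) =====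
def Claim_equal_passwordTest : Prop := ∀ (num : Int), Dom_passwordTest num → Pre_passwordTest num → Spec_passwordTest num (passwordTest num)

-- ===== LEMMAS AND PROOFS =====

def pvDigitChars : List Char := ['0','1','2','3','4','5','6','7','8','9']

theorem pv_toDigitsCore_digits (f : Nat) : ∀ (n : Nat) (acc : List Char),
    (∀ c ∈ acc, c ∈ pvDigitChars) → ∀ c ∈ Nat.toDigitsCore 10 f n acc, c ∈ pvDigitChars := by
  induction f with
  | zero => intro n acc hacc; simpa [Nat.toDigitsCore] using hacc
  | succ f ih =>
    intro n acc hacc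
    have hd : (n % 10).digitChar ∈ pvDigitChars := by
      have h10 : n % 10 < 10 := Nat.mod_lt _ (by omega)
      interval_cases h : n % 10 <;> decide
    have hacc' : ∀ c ∈ (n % 10).digitChar :: acc, c ∈ pvDigitChars := by
      intro c hc
      rcases List.mem_cons.mp hc with h1 | h2
      · exact h1 ▸ hd
      · exact hacc _ h2
    simp only [Nat.toDigitsCore]
    split
    · exact hacc'
    · exact ih _ _ hacc'

theorem pv_toChars_digits (num : Int) (h : 0 ≤ num) :
    ∀ c ∈ PySem.Int.toChars num, c ∈ pvDigitChars := by
  unfold PySem.Int.toChars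
  rw [if_neg (by omega)]
  exact pv_toDigitsCore_digits _ _ _ (by simp)

theorem pv_fold_inert (l : List Int) : ∀ (r : Int × Int) (acc : List (Int × Int)),
    l.foldl pvStep (r :: acc) = l.foldl pvStep [r] ++ acc := by
  induction l with
  | nil => intro r acc; rfl
  | cons b t ih =>
    intro r acc
    rcases r with ⟨d0, k⟩
    simp only [List.foldl_cons, pvStep]
    split_ifs
    · rw [ih, ih]
    · rw [ih ⟨b,1⟩ (⟨d0,k⟩ :: acc), ih ⟨b,1⟩ [⟨d0,k⟩], List.append_assoc]
      rfl

theorem pv_fold_run (j : Nat) : ∀ (a m : Int) (l' : List Int),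
    (List.replicate j a ++ l').foldl pvStep [(a, m)] = l'.foldl pvStep [(a, m + j)] := by
  induction j with
  | zero => intro a m l'; simp
  | succ j ih =>
    intro a m l'
    rw [List.replicate_succ]
    simp only [List.cons_append, List.foldl_cons, pvStep, if_true]
    rw [ih]
    have : m + 1 + (j:Int) = m + ((j:Nat)+1 : Nat) := by push_cast; ring
    rw [this]

def pvP (l : List Int) : Prop :=
  ∃ k : Nat, k + 1 < l.length ∧ l.getD k 0 = l.getD (k+1) 0 ∧
    (k = 0 ∨ l.getD (k-1) 0 ≠ l.getD k 0) ∧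
    (l.length ≤ k + 2 ∨ l.getD (k+2) 0 ≠ l.getD k 0)

theorem pv_getD_left (m : Nat) (a : Int) (l' : List Int) (i : Nat) (h : i < m) :
    (List.replicate m a ++ l').getD i 0 = a := by
  rw [List.getD_eq_getElem?_getD, List.getElem?_append_left (by simpa using h),
    List.getElem?_replicate, if_pos h]
  rfl

theorem pv_getD_right (m : Nat) (a : Int) (l' : List Int) (i : Nat) (h : m ≤ i) :
    (List.replicate m a ++ l').getD i 0 = l'.getD (i - m) 0 := by
  rw [List.getD_eq_getElem?_getD, List.getElem?_append_right (by simpa using h)]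
  simp [List.getD_eq_getElem?_getD]

theorem pvP_cons_run (m : Nat) (a : Int) (l' : List Int) (hm : 1 ≤ m)
    (hh : l'.head? ≠ some a) :
    pvP (List.replicate m a ++ l') ↔ (m = 2 ∨ pvP l') := by
  have hlen : (List.replicate m a ++ l').length = m + l'.length := by simp
  constructor
  · rintro ⟨k, hk1, hpair, hlow, hup⟩
    rw [hlen] at hk1 hup
    by_cases hkm : k + 1 < m
    · -- both positions inside the run
      left
      rcases hlow with h0 | hne
      · subst h0
        rcases hup with hle | hne2
        · omega
        · by_cases h2 : 2 < m
          · exact absurd (by rw [pv_getD_left m a l' 2 h2, pv_getD_left m a l' 0 (by omega)]) hne2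
          · omega
      · exact absurd (by rw [pv_getD_left m a l' (k-1) (by omega), pv_getD_left m a l' k (by omega)]) hne
    · by_cases hkm2 : k + 1 = m
      · -- pair straddles the boundary: impossible since l'.head ≠ a
        exfalso
        have hl' : l' ≠ [] := by intro h; subst h; simp at hk1; omega
        rcases l' with _ | ⟨b, t⟩
        · exact hl' rfl
        · have hb : b ≠ a := by simpa using hh
          rw [pv_getD_left m a _ k (by omega), pv_getD_right m a _ (k+1) (by omega)] at hpair
          simp [hkm2] at hpair
          exact hb hpair.symm
      · -- pair entirely inside l'
        right
        have hkm3 : m ≤ k := by omega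
        refine ⟨k - m, by omega, ?_, ?_, ?_⟩
        · rw [pv_getD_right m a l' k hkm3, pv_getD_right m a l' (k+1) (by omega)] at hpair
          have : k + 1 - m = k - m + 1 := by omega
          rwa [this] at hpair
        · by_cases hk0 : k - m = 0
          · exact Or.inl hk0
          · right
            rcases hlow with h0 | hne
            · omega
            · rw [pv_getD_right m a l' (k-1) (by omega), pv_getD_right m a l' k hkm3] at hne
              have : k - 1 - m = k - m - 1 := by omega
              rwa [this] at hne
        · rcases hup with hle | hne
          · exact Or.inl (by omega)
          · right
            rw [pv_getD_right m a l' (k+2) (by omega), pv_getD_right m a l' k hkm3] at hne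
            have : k + 2 - m = k - m + 2 := by omega
            rwa [this] at hne
  · rintro (h2 | ⟨k, hk1, hpair, hlow, hup⟩)
    · subst h2
      refine ⟨0, by simp, ?_, Or.inl rfl, ?_⟩
      · rw [pv_getD_left 2 a l' 0 (by omega), pv_getD_left 2 a l' 1 (by omega)]
      · rcases l' with _ | ⟨b, t⟩
        · simp
        · right
          have hb : b ≠ a := by simpa using hh
          rw [pv_getD_right 2 a _ 2 (by omega), pv_getD_left 2 a _ 0 (by omega)]
          simpa using hb
    · refine ⟨k + m, by rw [hlen]; omega, ?_, ?_, ?_⟩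
      · rw [pv_getD_right m a l' (k+m) (by omega), pv_getD_right m a l' (k+m+1) (by omega)]
        have e1 : k + m - m = k := by omega
        have e2 : k + m + 1 - m = k + 1 := by omega
        rw [e1, e2]; exact hpair
      · right
        by_cases hk0 : k = 0
        · subst hk0
          have hl' : l'.getD 0 0 ≠ a := by
            rcases l' with _ | ⟨b, t⟩
            · simp at hk1
            · simpa using fun h => hh (by simp [h])
          rw [pv_getD_left m a l' (0+m-1) (by omega), pv_getD_right m a l' (0+m) (by omega)]
          simpa using fun h => hl' h.symm
        · have hne : l'.getD (k-1) 0 ≠ l'.getD k 0 := by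
            rcases hlow with h | h
            · exact absurd h hk0
            · exact h
          rw [pv_getD_right m a l' (k+m-1) (by omega), pv_getD_right m a l' (k+m) (by omega)]
          have e1 : k + m - 1 - m = k - 1 := by omega
          have e2 : k + m - m = k := by omega
          rw [e1, e2]; exact hne
      · rcases hup with hle | hne
        · exact Or.inl (by rw [hlen]; omega)
        · right
          rw [pv_getD_right m a l' (k+m+2) (by omega), pv_getD_right m a l' (k+m) (by omega)]
          have e1 : k + m + 2 - m = k + 2 := by omega
          have e2 : k + m - m = k := by omega
          rw [e1, e2]; exact hne

theorem pv_head_dropWhile (p : Int → Bool) : ∀ (l : List Int) (b : Int),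
    (l.dropWhile p).head? = some b → p b = false := by
  intro l
  induction l with
  | nil => simp
  | cons x t ih =>
    intro b
    by_cases h : p x
    · rw [List.dropWhile_cons_of_pos h]; exact ih b
    · rw [List.dropWhile_cons_of_neg h]
      intro hb
      simp only [List.head?_cons, Option.some.injEq] at hb
      rw [← hb]
      simpa using h

theorem pv_anyTwo (l : List Int) :
    (l.foldl pvStep []).any (fun r => r.2 == 2) = true ↔ pvP l := by
  suffices H : ∀ (N : Nat) (l : List Int), l.length ≤ N →
      ((l.foldl pvStep []).any (fun r => r.2 == 2) = true ↔ pvP l) from H l.length l le_rfl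
  intro N
  induction N with
  | zero =>
    intro l hl
    have : l = [] := List.length_eq_zero_iff.mp (by omega)
    subst this
    simp [pvP]
  | succ N ih =>
    intro l hl
    rcases l with _ | ⟨a, t⟩
    · simp [pvP]
    · set p : Int → Bool := fun x => decide (x = a) with hp
      set j := (t.takeWhile p).length with hj
      set l' := t.dropWhile p with hl'
      have hrep : t.takeWhile p = List.replicate j a := by
        rw [hj]
        refine List.eq_replicate_of_mem (fun b hb => ?_)
        have hpb := List.mem_takeWhile_imp hb
        rw [hp] at hpb
        simpa using hpb
      have ht : t = List.replicate j a ++ l' := by rw [← hrep, hl', List.takeWhile_append_dropWhile]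
      have hhead : l'.head? ≠ some a := by
        rw [hl']
        intro h
        have hfa := pv_head_dropWhile p t a h
        rw [hp] at hfa
        simp at hfa
      have hlsplit : a :: t = List.replicate (j+1) a ++ l' := by
        rw [ht, List.replicate_succ]; rfl
      have hfold : (a :: t).foldl pvStep [] = l'.foldl pvStep [(a, 1 + (j:Int))] := by
        rw [ht]
        show (List.replicate j a ++ l').foldl pvStep (pvStep [] a) = _
        rw [show pvStep [] a = [(a, 1)] from rfl, pv_fold_run]
      have hlen' : l'.length ≤ N := by
        have := congrArg List.length ht
        simp at this hl
        omega
      have hPiff : pvP (a :: t) ↔ ((j + 1 = 2) ∨ pvP l') := by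
        rw [hlsplit]
        exact pvP_cons_run (j+1) a l' (by omega) hhead
      rcases l' with _ | ⟨b, t'⟩
      · rw [hfold]
        simp only [List.foldl_nil, List.any_cons, List.any_nil, Bool.or_false]
        rw [hPiff]
        constructor
        · intro h
          left
          have h2 : (1 : Int) + (j:Int) = 2 := by simpa using h
          omega
        · rintro (h | h)
          · simp only [beq_iff_eq]
            omega
          · exact absurd h (by simp [pvP])
      · have hb : b ≠ a := by
          intro h
          exact hhead (by simp [h])
        rw [hfold]
        simp only [List.foldl_cons]
        rw [show pvStep [(a, 1 + (j:Int))] b = (b, 1) :: [(a, 1 + (j:Int))] from by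
          simp [pvStep, Ne.symm hb], pv_fold_inert]
        rw [List.any_append]
        have hrec := ih (b :: t') hlen'
        rw [show (b :: t').foldl pvStep [] = t'.foldl pvStep [(b,1)] from rfl] at hrec
        rw [hPiff]
        simp only [List.any_cons, List.any_nil, Bool.or_false, Bool.or_eq_true, beq_iff_eq]
        rw [hrec]
        constructor
        · rintro (h | h)
          · right; exact h
          · left
            have h2 : (1:Int) + (j:Int) = 2 := by simpa using h
            omega
        · rintro (h | h)
          · right; show (1:Int) + (j:Int) = 2; omega
          · left; exact h

def pvVal (c : Char) : Int := (PySem.Int.ofChars? [c]).getD 0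

def pvPair (cs : List Char) (x : Int × Char) : Bool :=
  decide (x.1 + 1 < (cs.length : Int)) && decide (x.2 = PySem.List.pyGetD cs (x.1+1) ' ') &&
  ((decide (x.1 - 1 < 0) || decide (PySem.List.pyGetD cs (x.1-1) ' ' ≠ x.2)) &&
   (decide (x.1 + 2 ≥ (cs.length : Int)) || decide (PySem.List.pyGetD cs (x.1+2) ' ' ≠ x.2)))

def pvBad (cs : List Char) (x : Int × Char) : Bool :=
  decide (x.1 + 1 < (cs.length : Int)) && decide (pvVal x.2 > pvVal (PySem.List.pyGetD cs (x.1+1) ' '))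

theorem pv_pyGetD_at (cs : List Char) (k : Nat) (h : k < cs.length) :
    PySem.List.pyGetD cs (k : Int) ' ' = cs[k] := by
  rw [PySem.List.pyGetD_natCast]
  exact List.getD_eq_getElem cs ' ' h

theorem pv_getD_map (cs : List Char) (k : Nat) (h : k < cs.length) :
    (cs.map pvVal).getD k 0 = pvVal cs[k] := by
  rw [List.getD_eq_getElem (hn := by simpa using h)]
  simp

theorem pv_step_split (cs : List Char) (st : Bool × Bool) (x : Int × Char) :
    ((fun (st : Bool × Bool) (p : Int × Char) =>
      let hasDouble := st.1
      let isIncreasing := st.2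
      let i := p.1
      let digit := p.2
      if i + 1 < (cs.length : Int) then
        let isIncreasing := if (PySem.Int.ofChars? [digit]).getD 0 > (PySem.Int.ofChars? [PySem.List.pyGetD cs (i+1) ' ']).getD 0 then false else isIncreasing
        if digit = PySem.List.pyGetD cs (i+1) ' ' then
          if hasDouble then (hasDouble, isIncreasing)
          else
            let lowerGood := decide (i - 1 < 0) || decide (PySem.List.pyGetD cs (i-1) ' ' ≠ digit)
            let upperGood := decide (i + 2 ≥ (cs.length : Int)) || decide (PySem.List.pyGetD cs (i+2) ' ' ≠ digit)
            (lowerGood && upperGood, isIncreasing)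
        else (hasDouble, isIncreasing)
      else (hasDouble, isIncreasing)) st x) =
    ((if pvPair cs x then true else st.1), (if pvBad cs x then false else st.2)) := by
  rcases st with ⟨hd, inc⟩
  rcases x with ⟨i, c⟩
  simp only [pvPair, pvBad, pvVal]
  by_cases h1 : i + 1 < (cs.length : Int) <;>
    by_cases h2 : c = PySem.List.pyGetD cs (i+1) ' ' <;>
      cases hd <;>
        simp [h1, h2]

theorem pv_bad_iff (cs : List Char) :
    ((PySem.List.enumerate cs 0).any (pvBad cs) = true) ↔
      ∃ (k : Nat), ∃ (h : k + 1 < cs.length), pvVal cs[k+1] < pvVal cs[k] := by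
  rw [List.any_eq_true]
  constructor
  · rintro ⟨x, hx, hpx⟩
    rw [PySem.List.mem_enumerate_iff] at hx
    obtain ⟨k, hk, rfl⟩ := hx
    simp only [pvBad, Bool.and_eq_true, decide_eq_true_eq] at hpx
    obtain ⟨h1, h2⟩ := hpx
    have hk1 : k + 1 < cs.length := by omega
    refine ⟨k, hk1, ?_⟩
    rw [show (0 : Int) + (k : Int) + 1 = ((k+1 : Nat) : Int) by push_cast; ring,
      pv_pyGetD_at cs (k+1) hk1] at h2
    exact h2
  · rintro ⟨k, hk, hlt⟩
    refine ⟨(0 + (k : Int), cs[k]), ?_, ?_⟩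
    · rw [PySem.List.mem_enumerate_iff]
      exact ⟨k, by omega, rfl⟩
    · simp only [pvBad, Bool.and_eq_true, decide_eq_true_eq]
      constructor
      · omega
      · rw [show (0 : Int) + (k : Int) + 1 = ((k+1 : Nat) : Int) by push_cast; ring,
          pv_pyGetD_at cs (k+1) hk]
        exact hlt

theorem pv_inc_eq (cs : List Char) :
    (!(PySem.List.enumerate cs 0).any (pvBad cs)) =
      decide ((cs.map pvVal) = PySem.List.sorted (cs.map pvVal) (fun x => x) false) := by
  apply Bool.coe_iff_coe.mp
  simp only [Bool.not_eq_eq_eq_not, Bool.not_true, decide_eq_true_eq]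
  constructor
  · intro hfalse
    have hno : ¬ ∃ (k : Nat), ∃ (h : k + 1 < cs.length), pvVal cs[k+1] < pvVal cs[k] := by
      rw [← pv_bad_iff, hfalse]
      simp
    push_neg at hno
    have hchain : (cs.map pvVal).IsChain (· ≤ ·) := by
      rw [List.isChain_iff_getElem]
      intro i hi
      have := hno i (by simpa using hi)
      simpa using this
    have hpw : (cs.map pvVal).Pairwise (· ≤ ·) := List.isChain_iff_pairwise.mp hchain
    exact (PySem.List.sorted_eq_self_of_pairwise (cs.map pvVal) (fun x => x) hpw).symm
  · intro heq
    rw [Bool.eq_false_iff]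
    intro hany
    obtain ⟨k, hk, hlt⟩ := (pv_bad_iff cs).mp hany
    have hpw : (cs.map pvVal).Pairwise (· ≤ ·) := by
      have := PySem.List.sorted_pairwise (cs.map pvVal) (fun x => x)
      rw [← heq] at this
      exact this
    have hchain : (cs.map pvVal).IsChain (· ≤ ·) := List.isChain_iff_pairwise.mpr hpw
    have := (List.isChain_iff_getElem.mp hchain) k (by simpa using hk)
    simp only [List.getElem_map] at this
    omega

theorem pvVal_inj {c d : Char} (hc : c ∈ pvDigitChars) (hd : d ∈ pvDigitChars) :
    pvVal c = pvVal d ↔ c = d := by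
  fin_cases hc <;> fin_cases hd <;> simp [pvVal] <;> decide

theorem pv_val_ne (cs : List Char) (hdig : ∀ c ∈ cs, c ∈ pvDigitChars)
    (i j : Nat) (hi : i < cs.length) (hj : j < cs.length) :
    pvVal cs[i] ≠ pvVal cs[j] ↔ cs[i] ≠ cs[j] :=
  not_congr (pvVal_inj (hdig _ (List.getElem_mem hi)) (hdig _ (List.getElem_mem hj)))

theorem pv_pair_iff (cs : List Char) (hdig : ∀ c ∈ cs, c ∈ pvDigitChars) :
    ((PySem.List.enumerate cs 0).any (pvPair cs) = true) ↔ pvP (cs.map pvVal) := by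
  have hlen : (cs.map pvVal).length = cs.length := by simp
  rw [List.any_eq_true]
  constructor
  · rintro ⟨x, hx, hpx⟩
    rw [PySem.List.mem_enumerate_iff] at hx
    obtain ⟨k, hk, rfl⟩ := hx
    simp only [pvPair, Bool.and_eq_true, Bool.or_eq_true, decide_eq_true_eq] at hpx
    obtain ⟨⟨h1, h2⟩, hlow, hup⟩ := hpx
    have hk1 : k + 1 < cs.length := by omega
    rw [show (0 : Int) + (k : Int) + 1 = ((k+1 : Nat) : Int) by push_cast; ring,
      pv_pyGetD_at cs (k+1) hk1] at h2
    refine ⟨k, by omega, ?_, ?_, ?_⟩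
    · rw [pv_getD_map cs k (by omega), pv_getD_map cs (k+1) hk1]
      exact congrArg pvVal h2
    · by_cases hk0 : k = 0
      · exact Or.inl hk0
      · right
        rcases hlow with h | h
        · omega
        · rw [show (0 : Int) + (k : Int) - 1 = ((k-1 : Nat) : Int) by omega,
            pv_pyGetD_at cs (k-1) (by omega)] at h
          rw [pv_getD_map cs (k-1) (by omega), pv_getD_map cs k (by omega)]
          exact (pv_val_ne cs hdig (k-1) k (by omega) (by omega)).mpr h
    · by_cases hk2 : cs.length ≤ k + 2
      · exact Or.inl (by omega)
      · right
        rcases hup with h | h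
        · omega
        · rw [show (0 : Int) + (k : Int) + 2 = ((k+2 : Nat) : Int) by omega,
            pv_pyGetD_at cs (k+2) (by omega)] at h
          rw [pv_getD_map cs (k+2) (by omega), pv_getD_map cs k (by omega)]
          exact (pv_val_ne cs hdig (k+2) k (by omega) (by omega)).mpr h
  · rintro ⟨k, hk1, hpair, hlow, hup⟩
    rw [hlen] at hk1 hup
    refine ⟨(0 + (k : Int), cs[k]), ?_, ?_⟩
    · rw [PySem.List.mem_enumerate_iff]
      exact ⟨k, by omega, rfl⟩
    · simp only [pvPair, Bool.and_eq_true, Bool.or_eq_true, decide_eq_true_eq]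
      rw [pv_getD_map cs k (by omega), pv_getD_map cs (k+1) (by omega)] at hpair
      refine ⟨⟨by omega, ?_⟩, ?_, ?_⟩
      · rw [show (0 : Int) + (k : Int) + 1 = ((k+1 : Nat) : Int) by push_cast; ring,
          pv_pyGetD_at cs (k+1) (by omega)]
        exact (pvVal_inj (hdig _ (List.getElem_mem (by omega)))
          (hdig _ (List.getElem_mem (by omega)))).mp hpair
      · by_cases hk0 : k = 0
        · exact Or.inl (by omega)
        · right
          have hne : (cs.map pvVal).getD (k-1) 0 ≠ (cs.map pvVal).getD k 0 := by
            rcases hlow with h | h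
            · exact absurd h hk0
            · exact h
          rw [pv_getD_map cs (k-1) (by omega), pv_getD_map cs k (by omega)] at hne
          rw [show (0 : Int) + (k : Int) - 1 = ((k-1 : Nat) : Int) by omega,
            pv_pyGetD_at cs (k-1) (by omega)]
          exact (pv_val_ne cs hdig (k-1) k (by omega) (by omega)).mp hne
      · by_cases hk2 : cs.length ≤ k + 2
        · exact Or.inl (by omega)
        · right
          have hne : (cs.map pvVal).getD (k+2) 0 ≠ (cs.map pvVal).getD k 0 := by
            rcases hup with h | h
            · omega
            · exact h
          rw [pv_getD_map cs (k+2) (by omega), pv_getD_map cs k (by omega)] at hne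
          rw [show (0 : Int) + (k : Int) + 2 = ((k+2 : Nat) : Int) by omega,
            pv_pyGetD_at cs (k+2) (by omega)]
          exact (pv_val_ne cs hdig (k+2) k (by omega) (by omega)).mp hne

theorem pv_genEq (cs : List Char) (hdig : ∀ c ∈ cs, c ∈ pvDigitChars) :
    (((PySem.List.enumerate cs 0).foldl (fun (st : Bool × Bool) (p : Int × Char) =>
      let hasDouble := st.1
      let isIncreasing := st.2
      let i := p.1
      let digit := p.2
      if i + 1 < (cs.length : Int) then
        let isIncreasing := if (PySem.Int.ofChars? [digit]).getD 0 > (PySem.Int.ofChars? [PySem.List.pyGetD cs (i+1) ' ']).getD 0 then false else isIncreasing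
        if digit = PySem.List.pyGetD cs (i+1) ' ' then
          if hasDouble then (hasDouble, isIncreasing)
          else
            let lowerGood := decide (i - 1 < 0) || decide (PySem.List.pyGetD cs (i-1) ' ' ≠ digit)
            let upperGood := decide (i + 2 ≥ (cs.length : Int)) || decide (PySem.List.pyGetD cs (i+2) ' ' ≠ digit)
            (lowerGood && upperGood, isIncreasing)
        else (hasDouble, isIncreasing)
      else (hasDouble, isIncreasing)) (false, true)).2 &&
    ((PySem.List.enumerate cs 0).foldl (fun (st : Bool × Bool) (p : Int × Char) =>
      let hasDouble := st.1
      let isIncreasing := st.2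
      let i := p.1
      let digit := p.2
      if i + 1 < (cs.length : Int) then
        let isIncreasing := if (PySem.Int.ofChars? [digit]).getD 0 > (PySem.Int.ofChars? [PySem.List.pyGetD cs (i+1) ' ']).getD 0 then false else isIncreasing
        if digit = PySem.List.pyGetD cs (i+1) ' ' then
          if hasDouble then (hasDouble, isIncreasing)
          else
            let lowerGood := decide (i - 1 < 0) || decide (PySem.List.pyGetD cs (i-1) ' ' ≠ digit)
            let upperGood := decide (i + 2 ≥ (cs.length : Int)) || decide (PySem.List.pyGetD cs (i+2) ' ' ≠ digit)
            (lowerGood && upperGood, isIncreasing)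
        else (hasDouble, isIncreasing)
      else (hasDouble, isIncreasing)) (false, true)).1) =
    (decide ((cs.map (fun c => (PySem.Int.ofChars? [c]).getD 0)) = PySem.List.sorted (cs.map (fun c => (PySem.Int.ofChars? [c]).getD 0)) (fun x => x) false) &&
      ((cs.map (fun c => (PySem.Int.ofChars? [c]).getD 0)).foldl pvStep []).any (fun r => r.2 == 2)) := by
  have hmap : cs.map (fun c => (PySem.Int.ofChars? [c]).getD 0) = cs.map pvVal := rfl
  rw [hmap,
    PySem.List.foldl_congr_mem (PySem.List.enumerate cs 0) _
      (fun (st : Bool × Bool) x => ((if pvPair cs x then true else st.1), (if pvBad cs x then false else st.2)))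
      (false, true) (fun st x _ => pv_step_split cs st x),
    PySem.List.foldl_prod_mk (f := fun (hd : Bool) x => if pvPair cs x then true else hd)
      (g := fun (inc : Bool) x => if pvBad cs x then false else inc),
    PySem.List.foldl_if_true_eq (pvPair cs),
    PySem.List.foldl_if_false_eq (pvBad cs)]
  simp only [Bool.true_and, Bool.false_or]
  rw [pv_inc_eq cs,
    Bool.coe_iff_coe.mp ((pv_pair_iff cs hdig).trans (pv_anyTwo (cs.map pvVal)).symm)]

-- ===== VERDICT (by name: the statement is the Claim_ definition above) =====
theorem passwordTest_spec : Claim_equal_passwordTest := by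
  intro num _ hpre
  show passwordTest num = passwordTest_alt num
  simp only [passwordTest, passwordTest_alt]
  exact pv_genEq (PySem.Int.toChars num) (pv_toChars_digits num hpre)
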